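-- pv_equiv track=rewrite | github.com/SanyamJain2704/tda_basics | persistent_homology.py | group_pairs_by_dimension
-- ===== SOURCE A (Python) =====
-- def group_pairs_by_dimension(filtration, pairs):
--
--     dim_pairs = {}
--
--     for i, j in pairs:
--
--         simplex = filtration[i][0]
--         dim = len(simplex) - 1
--
--         if dim not in dim_pairs:
--             dim_pairs[dim] = []
--
--         dim_pairs[dim].append((i, j))
--
--     return dim_pairs
-- ===== SOURCE B (Python) =====
-- def group_pairs_by_dimension(filtration, pairs):
--     dims = [len(filtration[i][0]) - 1 for i, j in pairs]
--     keys = list(dict.fromkeys(dims))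
--     return {d: [p for p, dd in zip(pairs, dims) if dd == d] for d in keys}
-- ===== Notes on version B (the rewrite author's own statement) =====
-- stated objective: alternative
-- what changed: B replaces A's single-pass mutable-dict grouping by a declarative three-step pipeline: compute each pair's dimension once, take the ordered-distinct dimensions with dict.fromkeys, and build the result with a dict comprehension that filters pairs per dimension.
import Mathlib
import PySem

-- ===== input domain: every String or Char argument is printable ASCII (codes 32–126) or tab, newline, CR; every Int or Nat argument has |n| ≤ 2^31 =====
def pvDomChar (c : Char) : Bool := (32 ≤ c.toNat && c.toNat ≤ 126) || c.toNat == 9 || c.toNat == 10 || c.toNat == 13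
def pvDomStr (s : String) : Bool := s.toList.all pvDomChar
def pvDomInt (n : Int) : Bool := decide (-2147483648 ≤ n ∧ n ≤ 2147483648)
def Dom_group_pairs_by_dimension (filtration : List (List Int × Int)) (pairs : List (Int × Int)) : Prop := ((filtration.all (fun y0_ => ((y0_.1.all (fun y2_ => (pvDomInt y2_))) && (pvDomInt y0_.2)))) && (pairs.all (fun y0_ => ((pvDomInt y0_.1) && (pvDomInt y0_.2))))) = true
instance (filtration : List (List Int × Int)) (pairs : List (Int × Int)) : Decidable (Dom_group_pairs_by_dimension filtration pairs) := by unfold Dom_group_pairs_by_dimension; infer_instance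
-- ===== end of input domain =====

-- B groups the pairs by a declarative pipeline (dimensions, ordered-distinct keys, per-key filter)
-- instead of A's single-pass mutable dict; same return value on every input where A returns.

-- dim of the pair (i, j): len(filtration[i][0]) - 1; total form, exact under Pre_ (index in range)
def pvDimOf (filtration : List (List Int × Int)) (i : Int) : Int :=
  (((PySem.List.pyGet? filtration i).getD ([], 0)).1.length : Int) - 1

-- ===== PORT A =====
def group_pairs_by_dimension (filtration : List (List Int × Int)) (pairs : List (Int × Int)) : List (Int × List (Int × Int)) :=
  (pairs.foldl
    (fun dim_pairs p =>
      let dim := pvDimOf filtration p.1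
      let dim_pairs := if dim_pairs.contains dim then dim_pairs else dim_pairs.insert dim []
      dim_pairs.modify dim [] (fun l => l ++ [p]))
    PySem.Dict.empty).items

-- ===== PORT B =====
def group_pairs_by_dimension_alt (filtration : List (List Int × Int)) (pairs : List (Int × Int)) : List (Int × List (Int × Int)) :=
  let dims := pairs.map (fun p => pvDimOf filtration p.1)
  let keys := PySem.List.dedup dims
  keys.map (fun d => (d, ((pairs.zip dims).filter (fun q => q.2 == d)).map (·.1)))

-- ===== PRECONDITION & SPEC =====
-- Pre_ excludes exactly the inputs where A raises IndexError: some pair's first component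
-- is not a valid (possibly negative) Python index into filtration.
def Pre_group_pairs_by_dimension (filtration : List (List Int × Int)) (pairs : List (Int × Int)) : Prop :=
  ∀ p ∈ pairs, PySem.Raise.InRange filtration.length p.1
instance (filtration : List (List Int × Int)) (pairs : List (Int × Int)) : Decidable (Pre_group_pairs_by_dimension filtration pairs) := by unfold Pre_group_pairs_by_dimension; infer_instance

def pvWitness_group_pairs_by_dimension : (List (List Int × Int)) × (List (Int × Int)) :=
  ([([0], 0), ([0, 1], 1)], [(0, 1), (1, 1), (-1, 0)])

def Spec_group_pairs_by_dimension (filtration : List (List Int × Int)) (pairs : List (Int × Int)) (out : List (Int × List (Int × Int))) : Prop := out = group_pairs_by_dimension_alt filtration pairs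
instance (filtration : List (List Int × Int)) (pairs : List (Int × Int)) (out : List (Int × List (Int × Int))) : Decidable (Spec_group_pairs_by_dimension filtration pairs out) := by unfold Spec_group_pairs_by_dimension; infer_instance

-- ===== CLAIM (what is proved, stated in full; the proofs are below) =====
def Claim_equal_group_pairs_by_dimension : Prop := ∀ (filtration : List (List Int × Int)) (pairs : List (Int × Int)), Dom_group_pairs_by_dimension filtration pairs → Pre_group_pairs_by_dimension filtration pairs → Spec_group_pairs_by_dimension filtration pairs (group_pairs_by_dimension filtration pairs)

-- ===== LEMMAS AND PROOFS =====

-- A's "if dim not in d: d[dim] = []" step is redundant before the append: dropping it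
-- leaves the same dict (a modify on a missing key inserts at the end as well).
lemma step_insert_redundant (d : PySem.Dict Int (List (Int × Int))) (k : Int) (p : Int × Int) :
    (if d.contains k then d else d.insert k []).modify k [] (fun l => l ++ [p])
      = d.modify k [] (fun l => l ++ [p]) := by
  unfold PySem.Dict.modify
  by_cases h : d.contains k = true
  · rw [if_pos h]
  · rw [if_neg h, PySem.Dict.getD_insert_self, PySem.Dict.insert_insert_self,
      PySem.Dict.getD_of_not_contains d ([] : List (Int × Int)) (by simpa using h)]

-- zip with the mapped keys, filter on the key, project back = plain filter on the key
lemma zip_map_filter (pairs : List (Int × Int)) (key : (Int × Int) → Int) (d : Int) :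
    (((pairs.zip (pairs.map key)).filter (fun q => q.2 == d)).map (·.1))
      = pairs.filter (fun p => key p == d) := by
  induction pairs with
  | nil => rfl
  | cons p ps ih =>
    simp only [List.map_cons, List.zip_cons_cons, List.filter_cons]
    by_cases h : key p = d <;> simp [h, ih]

-- ===== VERDICT (by name: the statement is the Claim_ definition above) =====
-- both sides equal the canonical grouping: ordered-distinct dims, each with its filtered pairs
theorem group_pairs_by_dimension_spec : Claim_equal_group_pairs_by_dimension := by
  intro filtration pairs _ _
  unfold Spec_group_pairs_by_dimension group_pairs_by_dimension group_pairs_by_dimension_alt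
  -- A side: drop the redundant insert, then reshape the loop over (key, pair) items
  have h1 : (pairs.foldl
      (fun dim_pairs p =>
        let dim := pvDimOf filtration p.1
        let dim_pairs := if dim_pairs.contains dim then dim_pairs else dim_pairs.insert dim []
        dim_pairs.modify dim [] (fun l => l ++ [p]))
      PySem.Dict.empty)
      = pairs.foldl (fun d p => d.modify (pvDimOf filtration p.1) [] (fun l => l ++ [p]))
          PySem.Dict.empty := by
    congr 1
    funext d p
    exact step_insert_redundant d (pvDimOf filtration p.1) p
  rw [h1]
  have hnd : (pairs.foldl (fun d p => d.modify (pvDimOf filtration p.1) [] (fun l => l ++ [p]))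
      PySem.Dict.empty).keys.Nodup :=
    PySem.Dict.nodup_keys_foldl_modify_key _ _ _ _ _ (by simp [PySem.Dict.empty, PySem.Dict.keys])
  rw [PySem.Dict.items_eq_map_keys _ hnd ([] : List (Int × Int))]
  rw [PySem.Dict.keys_foldl_modify_key]
  -- B side: collapse the zip/filter/map comprehension
  simp only [zip_map_filter, PySem.List.dedup_eq_ofList]
  have hupd : PySem.Set.update (PySem.Dict.empty : PySem.Dict Int (List (Int × Int))).keys
      (pairs.map (fun p => pvDimOf filtration p.1))
      = PySem.Set.ofList (pairs.map (fun p => pvDimOf filtration p.1)) := rfl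
  rw [hupd]
  apply List.map_congr_left
  intro k hk
  have hg : (pairs.foldl (fun d p => d.modify (pvDimOf filtration p.1) [] (fun l => l ++ [p]))
        PySem.Dict.empty).getD k []
      = pairs.filter (fun p => pvDimOf filtration p.1 == k) := by
    have hh := PySem.Dict.getD_foldl_modify_append
        (pairs.map (fun p => (pvDimOf filtration p.1, p)))
        (PySem.Dict.empty : PySem.Dict Int (List (Int × Int))) k
    rw [List.foldl_map] at hh
    rw [hh]
    simp [List.filter_map, Function.comp_def, PySem.Dict.getD_of_not_contains
      (PySem.Dict.empty : PySem.Dict Int (List (Int × Int))) ([] : List (Int × Int)) rfl]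
  rw [hg]
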